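-- pv_equiv track=rewrite | github.com/RodrigoGarcia43/DAA-problems | 1 - Tareas y expertos/brute_calculate_days.py | solve
-- ===== SOURCE A (Python) =====
-- def solve(scientifics, tasks):
--     min = [1000000000]
--     scientifics.sort()
--     tasks.sort()
--     # Invalid distribution of scientifics
--     if scientifics[len(scientifics)-1] < tasks[len(tasks)-1]:
--         return -1
--
--     def Analiza(result, m, capacidad, tareas):
--         max = 0
--         count = [0] * m
--         for i in range(n):
--             if capacidad[result[i]] < tareas[i]:
--                 return
--             count[result[i]] += 1
--             if count[result[i]] > max:
--                 max = count[result[i]]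
--
--         if max < min[0]:
--             min[0] = max
--
--     def GetArray(x):
--         result = [0] * x
--         for i in range(x):
--             result[i] = i
--         return result
--
--     def VariacionesConRepeticiones(a, variacion, pos, m, capacidad, tareas):
--         if pos == len(variacion):
--             Analiza(variacion, m, capacidad, tareas)
--             return
--         for i in range(len(a)):
--             variacion[pos] = a[i]
--             VariacionesConRepeticiones(
--                 a, variacion, pos + 1, m, capacidad, tareas)
--
--     def GenerateAll(m, n, capacidad, tareas):
--         exp = GetArray(m)
--         result = [0] * n
--
--         VariacionesConRepeticiones(exp, result, 0, m, capacidad, tareas)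
--
--     m = len(scientifics)
--     n = len(tasks)
--
--     GenerateAll(m, n, scientifics, tasks)
--     return(min[0])
-- ===== SOURCE B (Python) =====
-- def solve(scientifics, tasks):
--     sci = sorted(scientifics, reverse=True)
--     tks = sorted(tasks, reverse=True)
--     if not sci or not tks or sci[0] < tks[0]:
--         return -1
--     ans = 0
--     j = 0
--     for i, t in enumerate(tks):
--         while j < len(sci) and sci[j] >= t:
--             j += 1
--         ans = max(ans, (i + j) // j)
--     return ans
-- ===== Notes on version B (the rewrite author's own statement) =====
-- stated objective: alternative
-- what changed: A enumerates all m^n assignments of tasks to scientists and minimises the maximum load over the valid ones; B sorts both lists descending once and computes the same optimum directly as max over i of ceil((i+1)/#{scientists with capacity >= i-th largest task}) with a two-pointer sweep (a timing run could not certify a ratio: A's enumeration already times out on tiny inputs, and where A finishes both run in well under a millisecond).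
import Mathlib
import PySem

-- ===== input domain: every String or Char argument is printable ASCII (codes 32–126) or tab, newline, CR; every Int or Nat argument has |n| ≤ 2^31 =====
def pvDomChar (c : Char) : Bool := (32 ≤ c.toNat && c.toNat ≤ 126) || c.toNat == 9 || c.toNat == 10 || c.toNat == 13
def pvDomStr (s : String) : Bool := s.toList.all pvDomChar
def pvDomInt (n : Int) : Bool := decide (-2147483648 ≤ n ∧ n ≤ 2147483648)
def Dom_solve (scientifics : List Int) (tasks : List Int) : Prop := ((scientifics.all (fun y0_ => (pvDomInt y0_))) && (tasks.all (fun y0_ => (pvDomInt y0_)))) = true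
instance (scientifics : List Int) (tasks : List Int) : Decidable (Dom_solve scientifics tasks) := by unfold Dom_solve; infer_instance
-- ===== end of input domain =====

-- B replaces A's m^n enumeration of assignments by a sorted two-pointer sweep that computes the same optimum directly.
-- Note: Python A sorts both of its argument lists IN PLACE (an observable mutation, which B reproduces not); the equivalence
-- proved here is about the return value only.

-- ===== PORT A =====
-- 'Analiza': the for-loop over range(n) is a fold whose early 'return' is modelled by an absorbing 'none' state.
def analiza (result : List Int) (cap : List Int) (tareas : List Int) (n : Nat) (minv : Int) : Int :=
  match (List.range n).foldl
      (fun st i =>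
        match st with
        | none => none
        | some (count, mx) =>
          let ri := PySem.List.pyGetD result (i : Int) 0
          let ci := PySem.List.pyGetD cap ri 0
          let ti := PySem.List.pyGetD tareas (i : Int) 0
          if ci < ti then none
          else
            let c := PySem.List.pyGetD count ri 0 + 1
            some (PySem.List.pySetD count ri c, if c > mx then c else mx))
      (some (List.replicate cap.length 0, (0 : Int))) with
  | none => minv
  | some (_, mx) => if mx < minv then mx else minv

-- 'GetArray(x)': the list [0, 1, ..., x-1].
def getArray (x : Nat) : List Int := (List.range x).map (fun i : Nat => (i : Int))

-- 'VariacionesConRepeticiones': recursion stops when pos == len(variacion); the port carries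
-- fuel = len(variacion) - pos (the number of positions still to fill), the same quantity, making the recursion structural.
def varRep (fuel : Nat) (a : List Int) (variacion : List Int) (pos : Nat)
    (cap : List Int) (tareas : List Int) (minv : Int) : Int :=
  match fuel with
  | 0 => analiza variacion cap tareas tareas.length minv
  | f + 1 =>
    a.foldl (fun mn v => varRep f a (PySem.List.pySetD variacion (pos : Int) v) (pos + 1) cap tareas mn) minv

-- 'scientifics[len(scientifics)-1]' raises IndexError on an empty list; Pre_solve excludes empty inputs, so the
-- sanctioned total form pyGetD is exact here.
def solve (scientifics : List Int) (tasks : List Int) : Int :=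
  let sci := PySem.List.sorted scientifics (fun x => x)
  let tks := PySem.List.sorted tasks (fun x => x)
  if PySem.List.pyGetD sci (PySem.List.len sci - 1) 0 < PySem.List.pyGetD tks (PySem.List.len tks - 1) 0 then -1
  else varRep tks.length (getArray sci.length) (List.replicate tks.length 0) 0 sci tks 1000000000

-- ===== PORT B =====
-- the inner 'while j < len(sci) and sci[j] >= t: j += 1' of Source B
def countGeFrom (sci : List Int) (t : Int) (j : Nat) : Nat :=
  if h : j < sci.length then
    (if t ≤ sci[j] then countGeFrom sci t (j + 1) else j)
  else j
termination_by sci.length - j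

def solve_alt (scientifics : List Int) (tasks : List Int) : Int :=
  let sci := PySem.List.sorted scientifics (fun x => x) true
  let tks := PySem.List.sorted tasks (fun x => x) true
  if sci.isEmpty || tks.isEmpty || PySem.List.pyGetD sci 0 0 < PySem.List.pyGetD tks 0 0 then -1
  else
    ((PySem.List.enumerate tks).foldl
      (fun st p =>
        let j := countGeFrom sci p.2 st.2
        (max st.1 (PySem.Int.floordiv (p.1 + (j : Int)) (j : Int)), j))
      ((0 : Int), (0 : Nat))).1

-- ===== PRECONDITION & SPEC =====
-- Pre_ excludes (i) an empty scientifics or tasks list, on which A raises IndexError, and (ii) task lists of more than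
-- 10^9 elements, on which A's '1000000000' sentinel would cap the returned minimum (and A's m^n enumeration cannot
-- in practice return at all).
def Pre_solve (scientifics : List Int) (tasks : List Int) : Prop :=
  scientifics ≠ [] ∧ tasks ≠ [] ∧ (tasks.length : Int) ≤ 1000000000
instance (scientifics : List Int) (tasks : List Int) : Decidable (Pre_solve scientifics tasks) := by
  unfold Pre_solve; infer_instance

def pvWitness_solve : List Int × List Int := ([2, 5], [1, 4, 5])

def Spec_solve (scientifics : List Int) (tasks : List Int) (out : Int) : Prop := out = solve_alt scientifics tasks
instance (scientifics : List Int) (tasks : List Int) (out : Int) : Decidable (Spec_solve scientifics tasks out) := by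
  unfold Spec_solve; infer_instance

-- ===== CLAIM (what is proved, stated in full; the proofs are below) =====
def Claim_equal_solve : Prop := ∀ (scientifics : List Int) (tasks : List Int), Dom_solve scientifics tasks → Pre_solve scientifics tasks → Spec_solve scientifics tasks (solve scientifics tasks)

-- ===== LEMMAS AND PROOFS =====


theorem mem_getArray {m : Nat} {v : Int} (h : v ∈ getArray m) : ∃ j, j < m ∧ v = ((j : Nat) : Int) := by
  obtain ⟨j, hj, he⟩ := List.mem_map.1 (show v ∈ (List.range m).map (fun i : Nat => (i : Int)) from h)
  exact ⟨j, List.mem_range.1 hj, he.symm⟩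

theorem le_lfmax_self {α : Type} [LinearOrder α] (a : α) (l : List α) : a ≤ l.foldl max a := by
  induction l generalizing a with
  | nil => simp
  | cons x xs ih => exact le_trans (le_max_left a x) (ih _)

theorem le_lfmax_of_mem {α : Type} [LinearOrder α] {x : α} {l : List α} (a : α) (h : x ∈ l) :
    x ≤ l.foldl max a := by
  induction l generalizing a with
  | nil => cases h
  | cons y ys ih =>
    rcases List.mem_cons.1 h with rfl | h'
    · exact le_trans (le_max_right a x) (le_lfmax_self _ _)
    · exact ih _ h'

theorem lfmax_le {α : Type} [LinearOrder α] {k : α} {l : List α} {a : α}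
    (ha : a ≤ k) (h : ∀ x ∈ l, x ≤ k) : l.foldl max a ≤ k := by
  induction l generalizing a with
  | nil => simpa using ha
  | cons y ys ih =>
    exact ih (max_le ha (h y (List.mem_cons_self))) (fun x hx => h x (List.mem_cons_of_mem _ hx))

def lmaxN (l : List Nat) : Nat := l.foldl max 0
def cVec (m : Nat) (p : List Int) : List Int := (List.range m).map (fun j => (p.count ((j : Nat) : Int) : Int))
def MCn (m : Nat) (w : List Int) : Nat := lmaxN ((List.range m).map (fun j => w.count ((j : Nat) : Int)))
def okW (cap : List Int) (tks : List Int) (w : List Int) : Bool :=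
  decide (∀ i, i < tks.length → tks.getD i 0 ≤ cap.getD (w.getD i 0).toNat 0)

theorem cvec_getD {m : Nat} (p : List Int) {j : Nat} (hj : j < m) :
    (cVec m p).getD j 0 = (p.count ((j : Nat) : Int) : Int) := by
  rw [cVec, List.getD_eq_getElem _ _ (by simpa using hj)]
  simp

theorem cvec_snoc {m : Nat} (p : List Int) {j : Nat} (hj : j < m) :
    (cVec m p).set j ((p.count ((j : Nat) : Int) : Int) + 1) = cVec m (p ++ [((j : Nat) : Int)]) := by
  apply List.ext_getElem
  · simp [cVec]
  · intro i h1 h2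
    have hi : i < m := by simpa [cVec] using h2
    rw [List.getElem_set]
    simp only [cVec, List.getElem_map, List.getElem_range, List.count_append, List.count_singleton]
    by_cases hij : j = i
    · subst hij; simp
    · have hne : (((i:Nat):Int) = ((j:Nat):Int)) → False := fun h => hij (by exact_mod_cast h.symm)
      simp [hij, beq_iff_eq, hne]

theorem MCn_zero (m : Nat) : MCn m [] = 0 := by
  apply Nat.le_antisymm _ (Nat.zero_le _)
  apply lfmax_le le_rfl
  intro x hx
  simp [List.count_nil] at hx
  omega

theorem MCn_snoc {m : Nat} (p : List Int) {j : Nat} (hj : j < m) :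
    MCn m (p ++ [((j : Nat) : Int)]) = max (MCn m p) (p.count ((j : Nat) : Int) + 1) := by
  apply Nat.le_antisymm
  · apply lfmax_le (Nat.zero_le _)
    intro x hx
    rcases List.mem_map.1 hx with ⟨j', hj', rfl⟩
    have hj'' : j' < m := List.mem_range.1 hj'
    rw [List.count_append, List.count_singleton]
    by_cases he : ((j:Nat):Int) == ((j':Nat):Int)
    · have : j' = j := by have := beq_iff_eq.1 he; exact_mod_cast this.symm
      subst this
      simp [he]
    · simp [he]
      exact Or.inl (le_lfmax_of_mem (0 : Nat) (List.mem_map.2 ⟨j', hj', rfl⟩))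
  · apply max_le
    · apply lfmax_le (Nat.zero_le _)
      intro x hx
      rcases List.mem_map.1 hx with ⟨j', hj', rfl⟩
      refine le_trans ?_ (le_lfmax_of_mem (0 : Nat) (List.mem_map.2 ⟨j', hj', rfl⟩))
      exact List.Sublist.count_le _ (List.sublist_append_left _ _)
    · have : p.count ((j:Nat):Int) + 1 = (p ++ [((j:Nat):Int)]).count ((j:Nat):Int) := by
        simp [List.count_append]
      rw [this]
      exact le_lfmax_of_mem (0 : Nat) (List.mem_map.2 ⟨j, List.mem_range.2 hj, rfl⟩)

theorem max_ite (mx c : Int) : (if c > mx then c else mx) = max mx c := by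
  split <;> omega

theorem analiza_loop {cap tks w : List Int} (hw : w.length = tks.length)
    (hent : ∀ x ∈ w, x ∈ getArray cap.length) :
    ∀ k, k ≤ tks.length →
    (List.range k).foldl
      (fun st i =>
        match st with
        | none => none
        | some (count, mx) =>
          let ri := PySem.List.pyGetD w (i : Int) 0
          let ci := PySem.List.pyGetD cap ri 0
          let ti := PySem.List.pyGetD tks (i : Int) 0
          if ci < ti then none
          else
            let c := PySem.List.pyGetD count ri 0 + 1
            some (PySem.List.pySetD count ri c, if c > mx then c else mx))
      (some (List.replicate cap.length 0, (0 : Int)))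
    = if ∀ i, i < k → tks.getD i 0 ≤ cap.getD (w.getD i 0).toNat 0
      then some (cVec cap.length (w.take k), ((MCn cap.length (w.take k) : Nat) : Int))
      else none := by
  intro k
  induction k with
  | zero =>
    intro _
    simp only [List.range_zero, List.foldl_nil]
    rw [if_pos (by omega)]
    congr 1
    congr 1
    · unfold cVec
      simp [List.map_const']
    · simp [MCn_zero]
  | succ k ih =>
    intro hk
    rw [List.range_succ, List.foldl_append, ih (by omega), List.foldl_cons, List.foldl_nil]
    have hkw : k < w.length := by omega
    obtain ⟨j, hjm, hj⟩ : ∃ j, j < cap.length ∧ w.getD k 0 = ((j:Nat):Int) := by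
      have hwk : w.getD k 0 ∈ w := by
        rw [List.getD_eq_getElem _ _ hkw]; exact List.getElem_mem _
      exact mem_getArray (hent _ hwk)
    by_cases hok : ∀ i, i < k → tks.getD i 0 ≤ cap.getD (w.getD i 0).toNat 0
    · rw [if_pos hok]
      simp only [PySem.List.pyGetD_natCast, PySem.List.pySetD_natCast]
      rw [hj]
      have hget : PySem.List.pyGetD cap ((j:Nat):Int) 0 = cap.getD j 0 := by simp
      rw [hget]
      by_cases hfail : cap.getD j 0 < tks.getD k 0
      · rw [if_pos hfail, if_neg]
        intro hc
        have := hc k (by omega)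
        rw [hj] at this
        simp only [Int.toNat_natCast] at this
        omega
      · rw [if_neg hfail]
        have hcond : ∀ i, i < k+1 → tks.getD i 0 ≤ cap.getD (w.getD i 0).toNat 0 := by
          intro i hi
          rcases Nat.lt_or_ge i k with h | h
          · exact hok i h
          · have : i = k := by omega
            subst this
            rw [hj]
            simp only [Int.toNat_natCast]
            omega
        rw [if_pos hcond]
        have hcg : PySem.List.pyGetD (cVec cap.length (w.take k)) ((j:Nat):Int) 0
            = ((w.take k).count ((j:Nat):Int) : Int) := by
          simp only [PySem.List.pyGetD_natCast, Int.toNat_natCast]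
          exact cvec_getD _ hjm
        rw [hcg]
        have hsd : PySem.List.pySetD (cVec cap.length (w.take k)) ((j:Nat):Int)
            (((w.take k).count ((j:Nat):Int) : Int) + 1)
            = cVec cap.length (w.take (k+1)) := by
          have htake : w.take (k+1) = w.take k ++ [((j:Nat):Int)] := by
            rw [List.take_succ, List.getElem?_eq_getElem hkw]
            rw [← hj, List.getD_eq_getElem _ _ hkw]
            rfl
          simp only [PySem.List.pySetD_natCast, Int.toNat_natCast]
          rw [cvec_snoc _ hjm, htake]
        rw [hsd]
        have hmx : (if ((w.take k).count ((j:Nat):Int) : Int) + 1 > (MCn cap.length (w.take k) : Int)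
            then ((w.take k).count ((j:Nat):Int) : Int) + 1
            else (MCn cap.length (w.take k) : Int)) = ((MCn cap.length (w.take (k+1)) : Nat) : Int) := by
          have htake : w.take (k+1) = w.take k ++ [((j:Nat):Int)] := by
            rw [List.take_succ, List.getElem?_eq_getElem hkw]
            rw [← hj, List.getD_eq_getElem _ _ hkw]
            rfl
          rw [max_ite, htake, MCn_snoc _ hjm]
          push_cast
          rfl
        rw [hmx]
    · rw [if_neg hok, if_neg]
      intro hc
      exact hok (fun i hi => hc i (by omega))

theorem min_ite (mx mn : Int) : (if mx < mn then mx else mn) = min mx mn := by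
  split <;> omega

theorem analiza_spec {cap tks w : List Int} (mn : Int)
    (hw : w.length = tks.length) (hent : ∀ x ∈ w, x ∈ getArray cap.length) :
    analiza w cap tks tks.length mn
      = if okW cap tks w then min ((MCn cap.length w : Nat) : Int) mn else mn := by
  unfold analiza
  rw [analiza_loop hw hent tks.length le_rfl]
  by_cases hok : ∀ i, i < tks.length → tks.getD i 0 ≤ cap.getD (w.getD i 0).toNat 0
  · rw [if_pos hok]
    have : okW cap tks w = true := by unfold okW; exact decide_eq_true hok
    rw [if_pos this]
    simp only []
    rw [List.take_of_length_le (by omega), min_ite]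
  · rw [if_neg hok]
    have : okW cap tks w = false := by unfold okW; exact decide_eq_false hok
    rw [this]
    simp

def tuples : Nat → List Int → List (List Int)
  | 0, _ => [[]]
  | k + 1, a => a.flatMap (fun v => (tuples k a).map (v :: ·))

theorem take_set {l : List Int} {pos : Nat} (v : Int) (h : pos < l.length) :
    (l.set pos v).take (pos + 1) = l.take pos ++ [v] := by
  rw [List.set_eq_take_cons_drop v h]
  have hlen : (l.take pos).length = pos := by simp; omega
  rw [← hlen, List.take_append]
  simp

theorem varRep_tuples : ∀ (fuel : Nat) (a var : List Int) (pos : Nat) (cap tks : List Int) (mn : Int),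
    pos + fuel = var.length →
    varRep fuel a var pos cap tks mn
      = (tuples fuel a).foldl (fun mn w => analiza (var.take pos ++ w) cap tks tks.length mn) mn := by
  intro fuel
  induction fuel with
  | zero =>
    intro a var pos cap tks mn h
    show analiza var cap tks tks.length mn = _
    rw [tuples, List.foldl_cons, List.foldl_nil, List.append_nil, List.take_of_length_le (by omega)]
  | succ f ih =>
    intro a var pos cap tks mn h
    show a.foldl (fun mn v => varRep f a (PySem.List.pySetD var (pos : Int) v) (pos + 1) cap tks mn) mn = _
    rw [tuples, List.foldl_flatMap]
    apply List.foldl_ext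
    intro mn' v hv
    rw [List.foldl_map]
    rw [ih a (PySem.List.pySetD var (pos : Int) v) (pos + 1) cap tks mn' (by simp; omega)]
    apply List.foldl_ext
    intro mn'' w hw
    congr 1
    rw [PySem.List.pySetD_natCast, take_set v (by omega)]
    simp
theorem nat_div_eq_iff {x K c : Nat} (hK : 0 < K) : x / K = c ↔ c * K ≤ x ∧ x < c * K + K :=
  ⟨fun h => h ▸ ⟨Nat.div_mul_le_self x K, Nat.lt_div_mul_add hK⟩,
   fun h => Nat.div_eq_of_lt_le h.1 (by rw [Nat.succ_mul]; omega)⟩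
def ceilD (a b : Nat) : Nat := (a + b - 1) / b
theorem ceilD_le_iff {a b c : Nat} (hb : 0 < b) : ceilD a b ≤ c ↔ a ≤ b * c := by
  unfold ceilD; rw [Nat.div_le_iff_le_mul_add_pred hb]; omega
theorem ceilD_pos {a b : Nat} (hb : 0 < b) (ha : 0 < a) : 0 < ceilD a b := by
  rcases Nat.eq_zero_or_pos (ceilD a b) with h | h
  · exfalso; have := (ceilD_le_iff hb (c := 0)).1 (le_of_eq h); omega
  · exact h
theorem ceilD_le_self {a b : Nat} (hb : 0 < b) : ceilD a b ≤ a := by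
  rw [ceilD_le_iff hb]; nlinarith
theorem map_getD_range (l : List Int) : (List.range l.length).map (fun j => l.getD j 0) = l := by
  apply List.ext_getElem
  · simp
  · intro i h1 h2; simp [List.getD_eq_getElem?_getD, List.getElem?_eq_getElem h2]
def gcnt (cap : List Int) (t : Int) : Nat := cap.countP (fun c => t ≤ c)

theorem desc_getD_iff {l : List Int} (hd : l.Pairwise (fun a b => b ≤ a)) {t : Int} {k : Nat}
    (hk : k < l.length) : t ≤ l.getD k 0 ↔ k < gcnt l t := by
  induction l generalizing k with
  | nil => simp at hk
  | cons x xs ih =>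
    have hx : ∀ y ∈ xs, y ≤ x := (List.pairwise_cons.1 hd).1
    have hd' := (List.pairwise_cons.1 hd).2
    cases k with
    | zero =>
      simp only [List.getD_cons_zero, gcnt, List.countP_cons]
      constructor
      · intro h; simp [h]
      · intro h
        by_contra hc
        have h0 : xs.countP (fun c => decide (t ≤ c)) = 0 := by
          rw [List.countP_eq_zero]
          intro y hy
          simp only [decide_eq_true_eq]
          intro hty
          exact hc (le_trans hty (hx y hy))
        simp [h0, hc] at h
    | succ k' =>
      have hk' : k' < xs.length := by simpa using hk
      rw [List.getD_cons_succ, ih hd' hk']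
      simp only [gcnt, List.countP_cons]
      by_cases ht : t ≤ x
      · simp [ht]
      · have h0 : xs.countP (fun c => decide (t ≤ c)) = 0 := by
          rw [List.countP_eq_zero]
          intro y hy
          simp only [decide_eq_true_eq]
          intro hty
          exact ht (le_trans hty (hx y hy))
        simp [ht, h0]

theorem asc_getD_iff {l : List Int} (ha : l.Pairwise (fun a b => a ≤ b)) {t : Int} {k : Nat}
    (hk : k < l.length) : t ≤ l.getD k 0 ↔ l.length - gcnt l t ≤ k := by
  have hrev : l.reverse.Pairwise (fun a b => b ≤ a) := by
    rw [List.pairwise_reverse]; exact ha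
  have hk2 : l.length - 1 - k < l.reverse.length := by simp; omega
  have h1 := desc_getD_iff hrev (t := t) hk2
  have hget : l.reverse.getD (l.length - 1 - k) 0 = l.getD k 0 := by
    rw [List.getD_eq_getElem _ _ hk2, List.getD_eq_getElem _ _ hk, List.getElem_reverse]
    congr 1
    omega
  have hcnt : gcnt l.reverse t = gcnt l t := by
    simp [gcnt, List.countP_reverse]
  rw [hget, hcnt] at h1
  rw [h1]
  have hle := List.countP_le_length (p := fun c => decide (t ≤ c)) (l := l)
  unfold gcnt
  omega
theorem countP_range_interval {lo hi : Nat} {P : Nat → Bool} : ∀ {n : Nat},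
    (∀ p, p < n → (P p = true ↔ (lo ≤ p ∧ p < hi))) →
    (List.range n).countP P = min hi n - min lo n := by
  intro n
  induction n with
  | zero => simp
  | succ n ih =>
    intro h
    rw [List.range_succ, List.countP_append]
    rw [ih (fun p hp => h p (by omega))]
    simp only [List.countP_singleton]
    by_cases hP : P n = true
    · have := (h n (by omega)).1 hP
      simp [hP]
      omega
    · have : ¬ (lo ≤ n ∧ n < hi) := fun hc => hP ((h n (by omega)).2 hc)
      simp [hP]
      omega

theorem pigeon {L : Nat} : ∀ (S : List Int), ∀ {l : List Int}, S.Nodup →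
    (∀ x ∈ l, x ∈ S) → (∀ x ∈ S, l.count x ≤ L) → l.length ≤ S.length * L := by
  intro S
  induction S with
  | nil => intro l _ hmem _; cases l with
    | nil => simp
    | cons y ys => exact absurd (hmem y (List.mem_cons_self)) (List.not_mem_nil)
  | cons s S' ih =>
    intro l hnd hmem hcnt
    have hsplit := List.length_eq_length_filter_add (l := l) (fun x => x == s)
    have h1 : (l.filter (fun x => x == s)).length ≤ L := by
      rw [← List.count_eq_length_filter]
      exact hcnt s (List.mem_cons_self)
    have h2 : (l.filter (fun x => !(x == s))).length ≤ S'.length * L := by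
      apply ih (List.nodup_cons.1 hnd).2
      · intro x hx
        have hx' := List.mem_of_mem_filter hx
        have hne : x ≠ s := by simpa using List.of_mem_filter hx
        rcases List.mem_cons.1 (hmem x hx') with rfl | h
        · exact absurd rfl hne
        · exact h
      · intro x hx
        calc (l.filter (fun x => !(x == s))).count x ≤ l.count x :=
              List.Sublist.count_le x List.filter_sublist
          _ ≤ L := hcnt x (List.mem_cons_of_mem _ hx)
    calc l.length = _ + _ := hsplit
      _ ≤ L + S'.length * L := Nat.add_le_add h1 h2
      _ = (s :: S').length * L := by simp [List.length_cons]; ring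


theorem mem_tuples : ∀ {k : Nat} {a w : List Int}, w ∈ tuples k a ↔ w.length = k ∧ ∀ x ∈ w, x ∈ a := by
  intro k
  induction k with
  | zero =>
    intro a w
    simp only [tuples, List.mem_singleton]
    constructor
    · rintro rfl; simp
    · rintro ⟨h1, _⟩; exact List.length_eq_zero_iff.1 h1
  | succ k ih =>
    intro a w
    simp only [tuples, List.mem_flatMap, List.mem_map]
    constructor
    · rintro ⟨v, hv, w', hw', rfl⟩
      obtain ⟨h1, h2⟩ := ih.1 hw'
      refine ⟨by simp [h1], ?_⟩
      intro x hx
      rcases List.mem_cons.1 hx with rfl | h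
      · exact hv
      · exact h2 x h
    · rintro ⟨h1, h2⟩
      cases w with
      | nil => simp at h1
      | cons v w' =>
        refine ⟨v, h2 v (List.mem_cons_self), w', ih.2 ⟨by simpa using h1, fun x hx => h2 x (List.mem_cons_of_mem _ hx)⟩, rfl⟩
theorem asc_getD_mono {l : List Int} (ha : l.Pairwise (fun a b => a ≤ b)) {p i : Nat}
    (hpi : p ≤ i) (hi : i < l.length) : l.getD p 0 ≤ l.getD i 0 := by
  rcases Nat.eq_or_lt_of_le hpi with rfl | h
  · exact le_rfl
  · rw [List.getD_eq_getElem _ _ (by omega), List.getD_eq_getElem _ _ hi]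
    exact List.pairwise_iff_getElem.1 ha p i (by omega) hi h
theorem getD_map_range' {n : Nat} (f : Nat → Int) {i : Nat} (hi : i < n) :
    (((List.range n).map f).getD i 0) = f i := by
  rw [List.getD_eq_getElem _ _ (by simpa using hi)]
  simp
theorem getArray_nodup (m : Nat) : (getArray m).Nodup := by
  apply List.Nodup.map
  · intro a b hab; simpa using hab
  · exact List.nodup_range


theorem gcnt_le_length (l : List Int) (t : Int) : gcnt l t ≤ l.length := List.countP_le_length
theorem mem_getArray' {m j : Nat} (h : j < m) : ((j : Nat) : Int) ∈ getArray m :=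
  List.mem_map.2 ⟨j, List.mem_range.2 h, rfl⟩
theorem countP_range_getD (l : List Int) (p : Int → Bool) :
    (List.range l.length).countP (fun j => p (l.getD j 0)) = l.countP p := by
  conv_rhs => rw [← map_getD_range l]
  rw [List.countP_map]
  rfl
def Kabs (cap : List Int) (tks : List Int) : Nat :=
  lmaxN ((List.range tks.length).map (fun p => ceilD (tks.length - p) (gcnt cap (tks.getD p 0))))

theorem lower_bound {cap tks w : List Int}
    (htks : tks.Pairwise (fun a b => a ≤ b))
    (hg : ∀ p, p < tks.length → 0 < gcnt cap (tks.getD p 0))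
    (hw : w.length = tks.length) (hent : ∀ x ∈ w, x ∈ getArray cap.length)
    (hok : okW cap tks w = true) :
    Kabs cap tks ≤ MCn cap.length w := by
  have hokP : ∀ i, i < tks.length → tks.getD i 0 ≤ cap.getD (w.getD i 0).toNat 0 :=
    of_decide_eq_true hok
  apply lfmax_le (Nat.zero_le _)
  intro x hx
  obtain ⟨p, hpr, rfl⟩ := List.mem_map.1 hx
  have hp : p < tks.length := List.mem_range.1 hpr
  set t := tks.getD p 0 with ht
  rw [ceilD_le_iff (hg p hp)]
  -- pigeonhole on w.drop p
  have hpg := pigeon (L := MCn cap.length w)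
    ((getArray cap.length).filter (fun r => decide (t ≤ cap.getD r.toNat 0)))
    (List.Nodup.filter _ (getArray_nodup cap.length))
    (l := w.drop p) ?hmem ?hcnt
  case hmem =>
    intro x hx
    obtain ⟨i0, hi0, rfl⟩ := List.mem_iff_getElem.1 hx
    rw [List.getElem_drop]
    have hidx : p + i0 < w.length := by
      have := List.length_drop (l := w) (i := p); omega
    apply List.mem_filter.2
    refine ⟨hent _ (List.getElem_mem _), ?_⟩
    have h1 := hokP (p + i0) (by omega)
    rw [List.getD_eq_getElem _ _ hidx] at h1
    have h2 : t ≤ tks.getD (p + i0) 0 := asc_getD_mono htks (by omega) (by omega)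
    simpa using le_trans h2 h1
  case hcnt =>
    intro x hxS
    obtain ⟨j, hj, rfl⟩ := mem_getArray (List.mem_filter.1 hxS).1
    calc (w.drop p).count ((j:Nat):Int) ≤ w.count ((j:Nat):Int) :=
          List.Sublist.count_le _ (List.drop_sublist _ _)
      _ ≤ MCn cap.length w := le_lfmax_of_mem (0 : Nat) (List.mem_map.2 ⟨j, List.mem_range.2 hj, rfl⟩)
  have hlenS : ((getArray cap.length).filter (fun r => decide (t ≤ cap.getD r.toNat 0))).length
      = gcnt cap t := by
    rw [← List.countP_eq_length_filter]
    unfold getArray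
    rw [List.countP_map]
    have : ((fun r : Int => decide (t ≤ cap.getD r.toNat 0)) ∘ (fun i : Nat => (i : Int)))
        = (fun j : Nat => decide (t ≤ cap.getD j 0)) := by
      funext j; simp
    rw [this]
    exact countP_range_getD cap (fun c => decide (t ≤ c))
  have hlend : (w.drop p).length = tks.length - p := by simp [hw]
  rw [hlenS, hlend] at hpg
  exact hpg

theorem Kabs_le_n {cap tks : List Int} (hg : ∀ p, p < tks.length → 0 < gcnt cap (tks.getD p 0)) :
    Kabs cap tks ≤ tks.length := by
  apply lfmax_le (Nat.zero_le _)
  intro x hx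
  obtain ⟨p, hpr, rfl⟩ := List.mem_map.1 hx
  have hp := List.mem_range.1 hpr
  exact le_trans (ceilD_le_self (hg p hp)) (by omega)

theorem Kabs_pos {cap tks : List Int} (hn : 0 < tks.length)
    (hg : ∀ p, p < tks.length → 0 < gcnt cap (tks.getD p 0)) :
    0 < Kabs cap tks := by
  have h0 : ceilD (tks.length - 0) (gcnt cap (tks.getD 0 0)) ∈
      (List.range tks.length).map (fun p => ceilD (tks.length - p) (gcnt cap (tks.getD p 0))) :=
    List.mem_map.2 ⟨0, List.mem_range.2 hn, rfl⟩
  have h1 : 0 < ceilD (tks.length - 0) (gcnt cap (tks.getD 0 0)) :=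
    ceilD_pos (hg 0 hn) (by omega)
  exact lt_of_lt_of_le h1 (le_lfmax_of_mem (0 : Nat) h0)

def witW (m n K : Nat) : List Int := (List.range n).map (fun p : Nat => ((m - 1 - (n - 1 - p) / K : Nat) : Int))

theorem term_le_K {cap tks : List Int} {p : Nat} (hp : p < tks.length) :
    ceilD (tks.length - p) (gcnt cap (tks.getD p 0)) ≤ Kabs cap tks :=
  le_lfmax_of_mem (0 : Nat) (List.mem_map.2 ⟨p, List.mem_range.2 hp, rfl⟩)

theorem qlt {cap tks : List Int} {p : Nat} (hp : p < tks.length)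
    (hgp : 0 < gcnt cap (tks.getD p 0)) (hK : 0 < Kabs cap tks) :
    (tks.length - 1 - p) / Kabs cap tks + 1 ≤ gcnt cap (tks.getD p 0) := by
  set K := Kabs cap tks
  set g := gcnt cap (tks.getD p 0)
  have h1 : tks.length - p ≤ g * K := (ceilD_le_iff hgp).1 (term_le_K hp)
  have h2 : (tks.length - 1 - p) / K + 1 = ceilD (tks.length - p) K := by
    rw [← Nat.add_div_right (tks.length - 1 - p) hK]
    unfold ceilD
    congr 1
    omega
  rw [h2, ceilD_le_iff hK, Nat.mul_comm]
  omega

theorem witW_getD {m n K : Nat} {i : Nat} (hi : i < n) :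
    (witW m n K).getD i 0 = ((m - 1 - (n - 1 - i) / K : Nat) : Int) :=
  getD_map_range' _ hi

theorem witness_valid {cap tks : List Int}
    (hcap : cap.Pairwise (fun a b => a ≤ b))
    (hm : 0 < cap.length) (hn : 0 < tks.length)
    (hg : ∀ p, p < tks.length → 0 < gcnt cap (tks.getD p 0)) :
    okW cap tks (witW cap.length tks.length (Kabs cap tks)) = true := by
  apply decide_eq_true
  intro i hi
  have hK := Kabs_pos hn hg
  rw [witW_getD hi, Int.toNat_natCast]
  have hq := qlt hi (hg i hi) hK
  have hgle : gcnt cap (tks.getD i 0) ≤ cap.length := gcnt_le_length cap _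
  rw [asc_getD_iff hcap (lt_of_le_of_lt (Nat.sub_le _ _) (Nat.sub_lt hm Nat.one_pos))]
  have h2 : cap.length - ((tks.length - 1 - i) / Kabs cap tks + 1)
      = cap.length - 1 - (tks.length - 1 - i) / Kabs cap tks := by
    rw [Nat.sub_sub cap.length 1 ((tks.length - 1 - i) / Kabs cap tks),
      Nat.add_comm 1 ((tks.length - 1 - i) / Kabs cap tks)]
  exact h2 ▸ Nat.sub_le_sub_left hq _

theorem witness_mem {cap tks : List Int} (hm : 0 < cap.length) :
    witW cap.length tks.length (Kabs cap tks) ∈ tuples tks.length (getArray cap.length) := by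
  apply mem_tuples.2
  constructor
  · simp [witW]
  · intro x hx
    obtain ⟨p, hp, rfl⟩ := List.mem_map.1 hx
    exact mem_getArray' (lt_of_le_of_lt (Nat.sub_le _ _) (Nat.sub_lt hm Nat.one_pos))

theorem witness_count_gen {m n K : Nat} (hK : 0 < K) {j : Nat} (hj : j < m)
    (hqb : ∀ p, p < n → (n - 1 - p) / K ≤ m - 1) :
    (witW m n K).count ((j : Nat) : Int)
      = min (n - (m - 1 - j) * K) n - min (n - (m - 1 - j) * K - K) n := by
  rw [witW, List.count, List.countP_map]
  rw [countP_range_interval (lo := n - (m - 1 - j) * K - K) (hi := n - (m - 1 - j) * K)]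
  intro p hp
  have hq := hqb p hp
  have hdiv := (nat_div_eq_iff (x := n - 1 - p) (c := m - 1 - j) hK)
  constructor
  · intro hPe
    have he : m - 1 - (n - 1 - p) / K = j := by
      have h1 : (((m - 1 - (n - 1 - p) / K : Nat) : Int) = ((j : Nat) : Int)) := by
        simpa using hPe
      exact_mod_cast h1
    have hqc : (n - 1 - p) / K = m - 1 - j := by omega
    have := hdiv.1 hqc
    omega
  · intro hlohi
    have hqc : (n - 1 - p) / K = m - 1 - j := hdiv.2 (by omega)
    have he : m - 1 - (n - 1 - p) / K = j := by omega
    show (((m - 1 - (n - 1 - p) / K : Nat) : Int) == ((j : Nat) : Int)) = true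
    rw [he]
    simp

theorem witness_MCn {cap tks : List Int}
    (hm : 0 < cap.length) (hn : 0 < tks.length)
    (hg : ∀ p, p < tks.length → 0 < gcnt cap (tks.getD p 0)) :
    MCn cap.length (witW cap.length tks.length (Kabs cap tks)) = Kabs cap tks := by
  have hK := Kabs_pos hn hg
  have hKn := Kabs_le_n hg
  have hqb : ∀ p, p < tks.length → (tks.length - 1 - p) / Kabs cap tks ≤ cap.length - 1 := by
    intro p hp
    have h1 := qlt hp (hg p hp) hK
    have h2 := gcnt_le_length cap (tks.getD p 0)
    exact Nat.le_sub_one_of_lt (Nat.lt_of_lt_of_le (Nat.lt_of_succ_le h1) h2)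
  apply Nat.le_antisymm
  · apply lfmax_le (Nat.zero_le _)
    intro x hx
    obtain ⟨j, hjr, rfl⟩ := List.mem_map.1 hx
    have hj := List.mem_range.1 hjr
    rw [witness_count_gen hK hj hqb]
    omega
  · have hcnt : (witW cap.length tks.length (Kabs cap tks)).count (((cap.length - 1 : Nat) : Int))
        = Kabs cap tks := by
      rw [witness_count_gen hK (Nat.sub_lt hm Nat.one_pos) hqb]
      simp only [Nat.sub_self, Nat.zero_mul, Nat.sub_zero]
      omega
    have hmem : (witW cap.length tks.length (Kabs cap tks)).count (((cap.length - 1 : Nat) : Int))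
        ∈ (List.range cap.length).map
            (fun j : Nat => (witW cap.length tks.length (Kabs cap tks)).count ((j : Nat) : Int)) :=
      List.mem_map_of_mem (List.mem_range.2 (Nat.sub_lt hm Nat.one_pos))
    have hle := le_lfmax_of_mem (0 : Nat) hmem
    rw [hcnt] at hle
    exact hle
theorem countGeFrom_eq {sci : List Int} (hd : sci.Pairwise (fun a b => b ≤ a)) {t : Int} : ∀ {j : Nat},
    j ≤ sci.length → (∀ k, k < j → t ≤ sci.getD k 0) →
    countGeFrom sci t j = gcnt sci t := by
  have hgl := gcnt_le_length sci t
  intro j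
  induction hfuel : sci.length - j generalizing j with
  | zero =>
    intro hj hbelow
    have hjl : j = sci.length := by omega
    rw [countGeFrom, dif_neg (by omega)]
    have : gcnt sci t ≥ sci.length := by
      by_contra hc
      push_neg at hc
      have := (desc_getD_iff hd (k := gcnt sci t) hc).1 (hbelow _ (by omega))
      omega
    omega
  | succ f ih =>
    intro hj hbelow
    have hjl : j < sci.length := by omega
    rw [countGeFrom, dif_pos hjl]
    by_cases ht : t ≤ sci[j]
    · rw [if_pos ht]
      apply ih (by omega) (by omega)
      intro k hk
      rcases Nat.lt_or_ge k j with h | h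
      · exact hbelow k h
      · have : k = j := by omega
        subst this
        rw [List.getD_eq_getElem _ _ hjl]
        exact ht
    · rw [if_neg ht]
      have h1 : ¬ (j < gcnt sci t) := by
        intro hc
        exact ht (by
          have := (desc_getD_iff hd hjl).2 hc
          rwa [List.getD_eq_getElem _ _ hjl] at this)
      have h2 : gcnt sci t ≤ j := by omega
      have h3 : j ≤ gcnt sci t := by
        by_contra hc
        push_neg at hc
        have := (desc_getD_iff hd (k := gcnt sci t) (by omega)).1 (hbelow _ hc)
        omega
      omega

theorem foldB {sci : List Int} (hd : sci.Pairwise (fun a b => b ≤ a)) :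
    ∀ (rest : List Int), rest.Pairwise (fun a b => b ≤ a) →
    ∀ (s : Nat) (ans : Int) (j : Nat), j ≤ sci.length →
    (∀ t ∈ rest, ∀ k, k < j → t ≤ sci.getD k 0) →
    ((PySem.List.enumerate rest (s : Int)).foldl
      (fun st p =>
        let j := countGeFrom sci p.2 st.2
        (max st.1 (PySem.Int.floordiv (p.1 + (j : Int)) (j : Int)), j)) (ans, j)).1
    = (PySem.List.enumerate rest (s : Int)).foldl
        (fun acc p => max acc ((ceilD (p.1.toNat + 1) (gcnt sci p.2) : Nat) : Int)) ans := by
  intro rest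
  induction rest with
  | nil => intro _ s ans j _ _; simp [PySem.List.enumerate_nil]
  | cons t rest' ih =>
    intro hdesc s ans j hj hbelow
    rw [PySem.List.enumerate_cons, List.foldl_cons, List.foldl_cons]
    have hcg : countGeFrom sci t j = gcnt sci t :=
      countGeFrom_eq hd hj (hbelow t List.mem_cons_self)
    simp only [hcg]
    have hs1 : (s : Int) + 1 = ((s + 1 : Nat) : Int) := by push_cast; ring
    rw [hs1]
    rw [ih (List.pairwise_cons.1 hdesc).2 (s + 1) _ (gcnt sci t) (gcnt_le_length sci t) ?_]
    · congr 2
      have hfd : PySem.Int.floordiv ((s : Int) + (gcnt sci t : Int)) ((gcnt sci t : Int))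
          = (((s + gcnt sci t) / gcnt sci t : Nat) : Int) := by
        have : (s : Int) + (gcnt sci t : Int) = ((s + gcnt sci t : Nat) : Int) := by push_cast; ring
        rw [this, PySem.Int.floordiv_natCast]
      rw [hfd]
      have : ceilD (((s : Int)).toNat + 1) (gcnt sci t) = (s + gcnt sci t) / gcnt sci t := by
        rw [Int.toNat_natCast]
        unfold ceilD
        congr 1
        omega
      rw [this]
    · intro t' ht' k hk
      have h1 : t' ≤ t := (List.pairwise_cons.1 hdesc).1 t' ht'
      have h2 : k < sci.length := by
        have := gcnt_le_length sci t; omega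
      have h3 := (desc_getD_iff hd h2).2 hk
      exact le_trans h1 h3

theorem foldmax_enum_eq {sci : List Int} : ∀ (l : List Int) (s : Nat) (ans0 : Nat),
    (PySem.List.enumerate l (s : Int)).foldl
        (fun acc p => max acc ((ceilD (p.1.toNat + 1) (gcnt sci p.2) : Nat) : Int)) ((ans0 : Nat) : Int)
    = ((((List.range l.length).map (fun i => ceilD (s + i + 1) (gcnt sci (l.getD i 0)))).foldl max ans0 : Nat) : Int) := by
  intro l
  induction l with
  | nil => intro s ans0; simp [PySem.List.enumerate_nil]
  | cons t l' ih =>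
    intro s ans0
    rw [PySem.List.enumerate_cons, List.foldl_cons]
    have h1 : max ((ans0 : Nat) : Int) ((ceilD (((s : Int)).toNat + 1) (gcnt sci t) : Nat) : Int)
        = ((max ans0 (ceilD (s + 1) (gcnt sci t)) : Nat) : Int) := by
      rw [Int.toNat_natCast, Nat.cast_max]
    rw [h1]
    have hs1 : (s : Int) + 1 = ((s + 1 : Nat) : Int) := by push_cast; ring
    rw [hs1, ih (s + 1) (max ans0 (ceilD (s + 1) (gcnt sci t)))]
    congr 1
    rw [List.length_cons, List.range_succ_eq_map, List.map_cons, List.foldl_cons, List.map_map]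
    have hmap : (List.range l'.length).map
          ((fun i => ceilD (s + i + 1) (gcnt sci ((t :: l').getD i 0))) ∘ Nat.succ)
        = (List.range l'.length).map (fun i => ceilD (s + 1 + i + 1) (gcnt sci (l'.getD i 0))) := by
      apply List.map_congr_left
      intro a ha
      simp only [Function.comp_apply, List.getD_cons_succ, Nat.succ_eq_add_one]
      congr 2
      omega
    rw [hmap]
    congr 2 <;> simp

theorem getD_reverse {l : List Int} {i : Nat} (hi : i < l.length) :
    l.reverse.getD i 0 = l.getD (l.length - 1 - i) 0 := by
  rw [List.getD_eq_getElem _ _ (by simpa using hi),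
      List.getD_eq_getElem _ _ (by omega), List.getElem_reverse]

theorem lmax_le_of (f g : Nat → Nat) (n : Nat) (h : ∀ i, i < n → ∃ p, p < n ∧ f i ≤ g p) :
    lmaxN ((List.range n).map f) ≤ lmaxN ((List.range n).map g) := by
  apply lfmax_le (Nat.zero_le _)
  intro x hx
  obtain ⟨i, hir, rfl⟩ := List.mem_map.1 hx
  obtain ⟨p, hp, hle⟩ := h i (List.mem_range.1 hir)
  exact le_trans hle (le_lfmax_of_mem (0 : Nat) (List.mem_map.2 ⟨p, List.mem_range.2 hp, rfl⟩))

theorem reindex_Kd {cap tksA : List Int} :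
    lmaxN ((List.range tksA.length).map
      (fun i => ceilD (i + 1) (gcnt cap (tksA.reverse.getD i 0)))) = Kabs cap tksA := by
  unfold Kabs
  apply Nat.le_antisymm
  · apply lmax_le_of
    intro i hi
    refine ⟨tksA.length - 1 - i, by omega, ?_⟩
    rw [getD_reverse hi]
    have h1 : tksA.length - (tksA.length - 1 - i) = i + 1 := by omega
    rw [h1]
  · apply lmax_le_of
    intro p hp
    refine ⟨tksA.length - 1 - p, by omega, ?_⟩
    rw [getD_reverse (by omega)]
    have h1 : tksA.length - 1 - (tksA.length - 1 - p) = p := by omega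
    have h2 : tksA.length - 1 - p + 1 = tksA.length - p := by omega
    rw [h1, h2]

theorem sorted_desc_eq_reverse (xs : List Int) :
    PySem.List.sorted xs (fun x => x) true = (PySem.List.sorted xs (fun x => x)).reverse := by
  have h1 : (PySem.List.sorted xs (fun x => x) true).reverse.Pairwise (fun a b : Int => a ≤ b) := by
    rw [List.pairwise_reverse]
    exact PySem.List.sorted_pairwise_rev xs (fun x => x)
  have h2 : (PySem.List.sorted xs (fun x => x)).Pairwise (fun a b : Int => a ≤ b) :=
    PySem.List.sorted_pairwise xs (fun x => x)
  have hperm : (PySem.List.sorted xs (fun x => x) true).reverse.Perm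
      (PySem.List.sorted xs (fun x => x)) :=
    ((List.reverse_perm _).trans (PySem.List.sorted_perm xs (fun x => x) true)).trans
      (PySem.List.sorted_perm xs (fun x => x) false).symm
  have heq := List.Perm.eq_of_pairwise
    (fun a b _ _ hab hba => le_antisymm hab hba) h1 h2 hperm
  rw [← heq, List.reverse_reverse]

theorem foldmin_le_init (f : List Int → Int) (P : List Int → Bool) (l : List (List Int)) (mn : Int) :
    l.foldl (fun mn w => if P w then min (f w) mn else mn) mn ≤ mn := by
  induction l generalizing mn with
  | nil => simp
  | cons x xs ih =>
    refine le_trans (ih _) ?_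
    by_cases hP : P x <;> simp [hP, min_le_right]

theorem foldmin_le_mem {f : List Int → Int} {P : List Int → Bool} {l : List (List Int)} {w : List Int}
    (mn : Int) (hw : w ∈ l) (hP : P w) :
    l.foldl (fun mn w => if P w then min (f w) mn else mn) mn ≤ f w := by
  induction l generalizing mn with
  | nil => cases hw
  | cons x xs ih =>
    rcases List.mem_cons.1 hw with rfl | h'
    · refine le_trans (foldmin_le_init f P xs _) ?_
      simp [hP, min_le_left]
    · exact ih _ h'

theorem foldmin_cases (f : List Int → Int) (P : List Int → Bool) (l : List (List Int)) (mn : Int) :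
    l.foldl (fun mn w => if P w then min (f w) mn else mn) mn = mn ∨
      ∃ w ∈ l, P w ∧ l.foldl (fun mn w => if P w then min (f w) mn else mn) mn = f w := by
  induction l generalizing mn with
  | nil => exact Or.inl rfl
  | cons x xs ih =>
    rw [List.foldl_cons]
    rcases ih (if P x then min (f x) mn else mn) with h | ⟨w, hw, hPw, hres⟩
    · rw [h]
      by_cases hPx : P x
      · rcases min_cases (f x) mn with ⟨h1, _⟩ | ⟨h1, _⟩
        · exact Or.inr ⟨x, List.mem_cons_self, hPx, by simp [hPx, h1]⟩
        · exact Or.inl (by simp [hPx, h1])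
      · exact Or.inl (by simp [hPx])
    · exact Or.inr ⟨w, List.mem_cons_of_mem _ hw, hPw, hres⟩

theorem gcnt_pos_of {cap tks : List Int} (htks : tks.Pairwise (fun a b => a ≤ b))
    (hm : 0 < cap.length) (hn : 0 < tks.length)
    (hmx : tks.getD (tks.length - 1) 0 ≤ cap.getD (cap.length - 1) 0) :
    ∀ p, p < tks.length → 0 < gcnt cap (tks.getD p 0) := by
  intro p hp
  have h1 : tks.getD p 0 ≤ tks.getD (tks.length - 1) 0 := asc_getD_mono htks (by omega) (by omega)
  have hmem : cap.getD (cap.length - 1) 0 ∈ cap := by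
    rw [List.getD_eq_getElem _ _ (by omega)]; exact List.getElem_mem _
  unfold gcnt
  rw [List.countP_pos_iff]
  exact ⟨_, hmem, decide_eq_true (le_trans h1 hmx)⟩

theorem A_res {cap tks : List Int}
    (hcap : cap.Pairwise (fun a b => a ≤ b)) (htks : tks.Pairwise (fun a b => a ≤ b))
    (hm : 0 < cap.length) (hn : 0 < tks.length)
    (hg : ∀ p, p < tks.length → 0 < gcnt cap (tks.getD p 0))
    (hbound : (tks.length : Int) ≤ 1000000000) :
    varRep tks.length (getArray cap.length) (List.replicate tks.length 0) 0 cap tks 1000000000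
      = ((Kabs cap tks : Nat) : Int) := by
  rw [varRep_tuples _ _ _ 0 _ _ _ (by simp)]
  have hfold : (tuples tks.length (getArray cap.length)).foldl
      (fun mn w => analiza ((List.replicate tks.length (0:Int)).take 0 ++ w) cap tks tks.length mn) 1000000000
    = (tuples tks.length (getArray cap.length)).foldl
      (fun mn w => if okW cap tks w then min ((MCn cap.length w : Nat) : Int) mn else mn) 1000000000 := by
    apply List.foldl_ext
    intro mn w hw
    rw [List.take_zero, List.nil_append]
    obtain ⟨hlen, hent⟩ := mem_tuples.1 hw
    exact analiza_spec mn hlen hent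
  rw [hfold]
  have hub := foldmin_le_mem (f := fun w => ((MCn cap.length w : Nat) : Int)) (P := okW cap tks)
    1000000000 (witness_mem hm) (witness_valid hcap hm hn hg)
  have hub2 : (tuples tks.length (getArray cap.length)).foldl
      (fun mn w => if okW cap tks w then min ((MCn cap.length w : Nat) : Int) mn else mn) 1000000000
      ≤ ((Kabs cap tks : Nat) : Int) := by
    refine le_trans hub (le_of_eq ?_)
    simp only [witness_MCn hm hn hg]
  have hKn := Kabs_le_n hg
  rcases foldmin_cases (fun w => ((MCn cap.length w : Nat) : Int)) (okW cap tks)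
      (tuples tks.length (getArray cap.length)) 1000000000 with hc | ⟨w, hwm, hPw, hres⟩
  · rw [hc] at hub2 ⊢
    have h2 : (Kabs cap tks : Int) ≤ (tks.length : Int) := by exact_mod_cast hKn
    omega
  · rw [hres] at hub2 ⊢
    obtain ⟨hlen, hent⟩ := mem_tuples.1 hwm
    have hlb := lower_bound htks hg hlen hent hPw
    have h2 : ((Kabs cap tks : Nat) : Int) ≤ ((MCn cap.length w : Nat) : Int) := by exact_mod_cast hlb
    omega

theorem B_res {cap tks : List Int}
    (hcap : cap.Pairwise (fun a b => a ≤ b)) (htks : tks.Pairwise (fun a b => a ≤ b))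
    (hg : ∀ p, p < tks.length → 0 < gcnt cap (tks.getD p 0)) :
    ((PySem.List.enumerate tks.reverse (0 : Int)).foldl
      (fun st p =>
        let j := countGeFrom cap.reverse p.2 st.2
        (max st.1 (PySem.Int.floordiv (p.1 + (j : Int)) (j : Int)), j)) ((0 : Int), (0 : Nat))).1
      = ((Kabs cap tks : Nat) : Int) := by
  have hdesc : cap.reverse.Pairwise (fun a b : Int => b ≤ a) := by
    rw [List.pairwise_reverse]; exact hcap
  have htd : tks.reverse.Pairwise (fun a b : Int => b ≤ a) := by
    rw [List.pairwise_reverse]; exact htks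
  have h1 := foldB hdesc tks.reverse htd 0 ((0 : Nat) : Int) 0 (Nat.zero_le _)
    (fun t _ k hk => absurd hk (Nat.not_lt_zero k))
  have h2 := foldmax_enum_eq (sci := cap.reverse) tks.reverse 0 0
  simp only [Nat.cast_zero] at h1 h2
  rw [h1, h2]
  have hmapc : (List.range tks.reverse.length).map
        (fun i => ceilD (0 + i + 1) (gcnt cap.reverse (tks.reverse.getD i 0)))
      = (List.range tks.length).map
        (fun i => ceilD (i + 1) (gcnt cap (tks.reverse.getD i 0))) := by
    rw [List.length_reverse]
    apply List.map_congr_left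
    intro a ha
    have hcg : gcnt cap.reverse (tks.reverse.getD a 0) = gcnt cap (tks.reverse.getD a 0) := by
      unfold gcnt; rw [List.countP_reverse]
    rw [hcg]
    congr 1
    omega
  rw [hmapc]
  have := reindex_Kd (cap := cap) (tksA := tks)
  unfold lmaxN at this
  rw [this]

-- ===== VERDICT (by name: the statement is the Claim_ definition above) =====
theorem solve_spec : Claim_equal_solve := by
  intro scientifics tasks hdom hpre
  obtain ⟨hs0, ht0, hbound⟩ := hpre
  unfold Spec_solve
  simp only [solve, solve_alt]
  rw [sorted_desc_eq_reverse scientifics, sorted_desc_eq_reverse tasks]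
  set A := PySem.List.sorted scientifics (fun x => x) with hA
  set T := PySem.List.sorted tasks (fun x => x) with hT
  have hAp : A.Pairwise (fun a b : Int => a ≤ b) := PySem.List.sorted_pairwise scientifics (fun x => x)
  have hTp : T.Pairwise (fun a b : Int => a ≤ b) := PySem.List.sorted_pairwise tasks (fun x => x)
  have hmA : 0 < A.length := by
    have h1 := (PySem.List.sorted_perm scientifics (fun x => x) false).length_eq
    rw [← hA] at h1
    have h2 : scientifics.length ≠ 0 := fun hc => hs0 (List.length_eq_zero_iff.1 hc)
    omega
  have hnT : 0 < T.length := by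
    have h1 := (PySem.List.sorted_perm tasks (fun x => x) false).length_eq
    rw [← hT] at h1
    have h2 : tasks.length ≠ 0 := fun hc => ht0 (List.length_eq_zero_iff.1 hc)
    omega
  have hTbound : (T.length : Int) ≤ 1000000000 := by
    have h1 := (PySem.List.sorted_perm tasks (fun x => x) false).length_eq
    rw [← hT] at h1
    omega
  have eA : PySem.List.pyGetD A (PySem.List.len A - 1) 0 = A.getD (A.length - 1) 0 := by
    rw [PySem.List.len_eq, show ((A.length : Int) - 1) = ((A.length - 1 : Nat) : Int) by omega,
      PySem.List.pyGetD_natCast]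
  have eT : PySem.List.pyGetD T (PySem.List.len T - 1) 0 = T.getD (T.length - 1) 0 := by
    rw [PySem.List.len_eq, show ((T.length : Int) - 1) = ((T.length - 1 : Nat) : Int) by omega,
      PySem.List.pyGetD_natCast]
  have eA0 : PySem.List.pyGetD A.reverse 0 0 = A.getD (A.length - 1) 0 := by
    rw [PySem.List.pyGetD_zero, getD_reverse (by omega), Nat.sub_zero]
  have eT0 : PySem.List.pyGetD T.reverse 0 0 = T.getD (T.length - 1) 0 := by
    rw [PySem.List.pyGetD_zero, getD_reverse (by omega), Nat.sub_zero]
  have hAne : A ≠ [] := by intro hc; rw [hc] at hmA; simp at hmA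
  have hTne : T ≠ [] := by intro hc; rw [hc] at hnT; simp at hnT
  have heA : A.reverse.isEmpty = false := by
    simp [List.isEmpty_eq_false_iff, List.reverse_eq_nil_iff, hAne]
  have heT : T.reverse.isEmpty = false := by
    simp [List.isEmpty_eq_false_iff, List.reverse_eq_nil_iff, hTne]
  rw [eA, eT, eA0, eT0, heA, heT]
  by_cases hlt : A.getD (A.length - 1) 0 < T.getD (T.length - 1) 0
  · rw [if_pos hlt]
    have hc : (false || false || decide (A.getD (A.length - 1) 0 < T.getD (T.length - 1) 0)) = true := by
      rw [Bool.false_or, Bool.false_or]; exact decide_eq_true hlt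
    rw [hc, if_pos rfl]
  · rw [if_neg hlt]
    have hcond : (false || false || decide (A.getD (A.length - 1) 0 < T.getD (T.length - 1) 0)) = false := by
      rw [Bool.false_or, Bool.false_or]; exact decide_eq_false hlt
    rw [hcond]
    simp only [Bool.false_eq_true, if_false]
    have hg := gcnt_pos_of hTp hmA hnT (by omega)
    rw [A_res hAp hTp hmA hnT hg hTbound, B_res hAp hTp hg]
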